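-- pv_equiv track=rewrite | github.com/recepcyavas/nba_stats_with_visuals | compute_player_stats.py | is_near_triple_double
-- ===== SOURCE A (Python) =====
-- def is_near_triple_double(row):
--     """
--     Check if game is a near triple-double.
--
--     Definition:
--         - At least 2 stats >= 10
--         - At least 3 stats >= 9
--         - NOT a triple-double (td3 = 0)
--
--     Args:
--         row: Dict with game stats
--
--     Returns:
--         True if near triple-double
--     """
--     if row.get('td3', 0) == 1:
--         return False
--
--     stats = [
--         row.get('pts', 0),
--         row.get('reb', 0),
--         row.get('ast', 0),
--         row.get('stl', 0),
--         row.get('blk', 0),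
--     ]
--
--     at_least_10 = sum(1 for s in stats if s >= 10)
--     at_least_9 = sum(1 for s in stats if s >= 9)
--
--     return at_least_10 >= 2 and at_least_9 >= 3
-- ===== SOURCE B (Python) =====
-- def is_near_triple_double(row):
--     if row.get('td3', 0) == 1:
--         return False
--     stats = sorted((row.get(k, 0) for k in ('pts', 'reb', 'ast', 'stl', 'blk')),
--                    reverse=True)
--     return stats[1] >= 10 and stats[2] >= 9
-- ===== Notes on version B (the rewrite author's own statement) =====
-- stated objective: alternative
-- what changed: Replaces the two counting passes over the five stats by one descending sort plus order-statistic checks: 2nd largest >= 10 and 3rd largest >= 9.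
import Mathlib
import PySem

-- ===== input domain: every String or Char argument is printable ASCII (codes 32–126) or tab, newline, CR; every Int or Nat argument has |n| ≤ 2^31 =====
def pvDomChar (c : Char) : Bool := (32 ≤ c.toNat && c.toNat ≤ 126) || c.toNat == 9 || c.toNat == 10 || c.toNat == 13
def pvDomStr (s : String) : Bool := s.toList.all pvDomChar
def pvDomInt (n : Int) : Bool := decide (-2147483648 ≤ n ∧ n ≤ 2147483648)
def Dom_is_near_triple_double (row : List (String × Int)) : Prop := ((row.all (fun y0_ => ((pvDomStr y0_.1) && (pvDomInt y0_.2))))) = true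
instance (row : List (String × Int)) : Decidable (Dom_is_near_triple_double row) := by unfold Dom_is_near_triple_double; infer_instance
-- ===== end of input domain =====

-- B replaces A's two counting passes by a descending sort of the five stats plus order-statistic checks (alternative decomposition, same cost).


-- ===== PORT A =====
def is_near_triple_double (row : List (String × Int)) : Bool :=
  let d := PySem.Dict.mk row
  if d.getD "td3" 0 = 1 then false
  else
    let stats : List Int :=
      [d.getD "pts" 0, d.getD "reb" 0, d.getD "ast" 0, d.getD "stl" 0, d.getD "blk" 0]
    -- sum(1 for s in stats if s >= 10) as a fold, step for step
    let at_least_10 : Int := stats.foldl (fun acc s => if s ≥ 10 then acc + 1 else acc) 0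
    let at_least_9 : Int := stats.foldl (fun acc s => if s ≥ 9 then acc + 1 else acc) 0
    decide (at_least_10 ≥ 2) && decide (at_least_9 ≥ 3)

-- ===== PORT B =====
def is_near_triple_double_alt (row : List (String × Int)) : Bool :=
  let d := PySem.Dict.mk row
  if d.getD "td3" 0 = 1 then false
  else
    let stats : List Int :=
      PySem.List.sorted
        [d.getD "pts" 0, d.getD "reb" 0, d.getD "ast" 0, d.getD "stl" 0, d.getD "blk" 0]
        (fun x => x) true
    decide (stats[1]! ≥ 10) && decide (stats[2]! ≥ 9)

-- ===== PRECONDITION & SPEC =====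
def Spec_is_near_triple_double (row : List (String × Int)) (out : Bool) : Prop := out = is_near_triple_double_alt row
instance (row : List (String × Int)) (out : Bool) : Decidable (Spec_is_near_triple_double row out) := by unfold Spec_is_near_triple_double; infer_instance

-- ===== CLAIM (what is proved, stated in full; the proofs are below) =====
def Claim_equal_is_near_triple_double : Prop := ∀ (row : List (String × Int)), Dom_is_near_triple_double row → Spec_is_near_triple_double row (is_near_triple_double row)

-- ===== LEMMAS AND PROOFS =====

-- A's generator-sum counting loop as countP.
theorem pv_foldl_count (c : Int) (l : List Int) (acc : Int) :
    l.foldl (fun a x => if x ≥ c then a + 1 else a) acc = acc + l.countP (fun x => decide (c ≤ x)) := by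
  induction l generalizing acc with
  | nil => simp
  | cons x xs ih =>
    simp only [List.foldl_cons, List.countP_cons, ih]
    by_cases h : c ≤ x <;> simp [h, ge_iff_le] <;> ring

-- Order statistic of a descending list vs. count of elements ≥ c.
theorem pv_orderstat (t : List Int) (ht : t.Pairwise (fun a b => b ≤ a)) (i : Nat)
    (hi : i < t.length) (c : Int) :
    c ≤ t[i] ↔ i + 1 ≤ t.countP (fun x => decide (c ≤ x)) := by
  rw [List.pairwise_iff_getElem] at ht
  constructor
  · intro hc
    have h1 : (t.take (i + 1)).countP (fun x => decide (c ≤ x)) = i + 1 := by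
      rw [List.countP_eq_length.mpr, List.length_take]
      · omega
      · intro x hx
        obtain ⟨j, hj, hje⟩ := List.getElem_of_mem hx
        rw [List.getElem_take] at hje
        have hji : j ≤ i := by simp [List.length_take] at hj; omega
        have : t[i] ≤ t[j]'(by omega) := by
          rcases Nat.lt_or_ge j i with h | h
          · exact ht j i (by omega) hi h
          · have : j = i := by omega
            subst this; exact le_refl _
        simp only [decide_eq_true_iff]
        omega
    calc i + 1 = (t.take (i+1)).countP _ := h1.symm
      _ ≤ t.countP _ := by
          conv_rhs => rw [← List.take_append_drop (i+1) t]
          rw [List.countP_append]; omega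
  · intro hcount
    by_contra hc
    push Not at hc
    have h2 : (t.drop i).countP (fun x => decide (c ≤ x)) = 0 := by
      rw [List.countP_eq_zero]
      intro x hx
      obtain ⟨j, hj, hje⟩ := List.getElem_of_mem hx
      rw [List.getElem_drop] at hje
      have hjl : i + j < t.length := by simp at hj; omega
      have : t[i + j]'hjl ≤ t[i] := by
        rcases Nat.eq_zero_or_pos j with h | h
        · subst h; simp
        · exact ht i (i + j) hi hjl (by omega)
      simp only [decide_eq_true_iff]
      omega
    have h3 : t.countP (fun x => decide (c ≤ x)) ≤ i := by
      conv_lhs => rw [← List.take_append_drop i t]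
      rw [List.countP_append, h2]
      have := List.length_take_le i t
      have := t.countP_le_length (p := fun x => decide (c ≤ x))
      calc (t.take i).countP _ + 0 ≤ (t.take i).length := by
            simpa using (t.take i).countP_le_length (p := fun x => decide (c ≤ x))
        _ ≤ i := List.length_take_le i t
    omega

-- Core fact about five arbitrary ints: the counting formulation equals the order-statistic one.
theorem pv_core (p r a s b : Int) :
    (decide (([p, r, a, s, b].foldl (fun acc x => if x ≥ 10 then acc + 1 else acc) (0:Int)) ≥ 2) &&
     decide (([p, r, a, s, b].foldl (fun acc x => if x ≥ 9 then acc + 1 else acc) (0:Int)) ≥ 3))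
    =
    (decide ((PySem.List.sorted [p, r, a, s, b] (fun x => x) true)[1]! ≥ 10) &&
     decide ((PySem.List.sorted [p, r, a, s, b] (fun x => x) true)[2]! ≥ 9)) := by
  set L : List Int := [p, r, a, s, b] with hL
  set t := PySem.List.sorted L (fun x => x) true with hts
  have hperm : t.Perm L := PySem.List.sorted_perm L (fun x => x) true
  have hlen : t.length = 5 := by rw [hperm.length_eq, hL]; rfl
  have hpair : t.Pairwise (fun a b => b ≤ a) := by
    simpa using PySem.List.sorted_pairwise_rev L (fun x => x)
  have hcnt : ∀ c : Int, t.countP (fun x => decide (c ≤ x)) = L.countP (fun x => decide (c ≤ x)) :=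
    fun c => hperm.countP_eq _
  have h1 : t[1]! = t[1]'(by omega) := getElem!_pos t 1 (by omega)
  have h2 : t[2]! = t[2]'(by omega) := getElem!_pos t 2 (by omega)
  rw [pv_foldl_count, pv_foldl_count, h1, h2]
  congr 1
  · rw [decide_eq_decide]
    have := pv_orderstat t hpair 1 (by omega) 10
    rw [hcnt] at this
    omega
  · rw [decide_eq_decide]
    have := pv_orderstat t hpair 2 (by omega) 9
    rw [hcnt] at this
    omega

-- ===== VERDICT (by name: the statement is the Claim_ definition above) =====
theorem is_near_triple_double_spec : Claim_equal_is_near_triple_double := by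
  intro row _
  unfold Spec_is_near_triple_double is_near_triple_double is_near_triple_double_alt
  simp only
  split_ifs with h
  · rfl
  · exact pv_core _ _ _ _ _
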